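-- pv_equiv track=rewrite | github.com/danieleschmidt/BCI-Agent-Bridge | src/bci_agent_bridge/i18n/enhanced_translator.py | _simplify_language
-- ===== SOURCE A (Python) =====
-- def _simplify_language(text: str, language: str) -> str:
--     """Simplify language for cognitive accessibility."""
--     # Use simpler vocabulary
--     simplifications = {
--         'en': {
--             'select': 'pick',
--             'confirm': 'yes',
--             'cancel': 'no',
--             'navigate': 'go',
--             'terminate': 'stop'
--         },
--         'es': {
--             'seleccionar': 'elegir',
--             'confirmar': 'sí',
--             'cancelar': 'no',
--             'navegar': 'ir'
--         }
--     }
--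
--     if language in simplifications:
--         simplified = text
--         for complex_word, simple_word in simplifications[language].items():
--             simplified = simplified.replace(complex_word, simple_word)
--         return simplified
--
--     return text
-- ===== SOURCE B (Python) =====
-- def _simplify_language(text: str, language: str) -> str:
--     """Simplify language for cognitive accessibility (single left-to-right pass)."""
--     if language == 'en':
--         pairs = [('select', 'pick'), ('confirm', 'yes'), ('cancel', 'no'),
--                  ('navigate', 'go'), ('terminate', 'stop')]
--     elif language == 'es':
--         pairs = [('seleccionar', 'elegir'), ('confirmar', 'sí'),
--                  ('cancelar', 'no'), ('navegar', 'ir')]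
--     else:
--         return text
--     out = []
--     i = 0
--     n = len(text)
--     while i < n:
--         for word, simple in pairs:
--             if text.startswith(word, i):
--                 out.append(simple)
--                 i += len(word)
--                 break
--         else:
--             out.append(text[i])
--             i += 1
--     return ''.join(out)
-- ===== Notes on version B (the rewrite author's own statement) =====
-- stated objective: alternative
-- what changed: B drops A's nested dict and its k sequential str.replace passes (each rescanning the whole string): it selects a flat pair list by an if/elif on the language and builds the result in a single left-to-right scan that at each position either emits the replacement for the first matching word or copies the character; equivalence holds because no word of the table overlaps another and no replacement text can combine with its context to form a word.
import Mathlib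
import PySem

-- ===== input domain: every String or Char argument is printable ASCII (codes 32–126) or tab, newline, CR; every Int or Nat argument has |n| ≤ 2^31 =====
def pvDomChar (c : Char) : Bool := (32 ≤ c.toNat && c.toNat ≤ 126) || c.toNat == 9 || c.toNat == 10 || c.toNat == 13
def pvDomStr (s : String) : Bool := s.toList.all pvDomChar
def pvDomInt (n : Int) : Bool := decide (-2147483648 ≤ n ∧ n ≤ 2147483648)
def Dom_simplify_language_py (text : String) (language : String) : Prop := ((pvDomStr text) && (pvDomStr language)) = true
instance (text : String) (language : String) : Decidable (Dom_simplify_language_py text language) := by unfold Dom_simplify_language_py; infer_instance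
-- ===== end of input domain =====

-- B drops A's nested dict and its k sequential str.replace passes: an if/elif picks a flat pair
-- list and one left-to-right scan builds the result; an 'alternative' re-implementation of the
-- same cost, proved to return the same string.

-- ===== PORT A =====
-- Literal transliteration of A: dict literal, membership test, then one str.replace per item.
def simplify_language_py (text : String) (language : String) : String :=
  let simplifications : PySem.Dict String (PySem.Dict String String) :=
    PySem.Dict.mk
      [("en", PySem.Dict.mk
          [("select", "pick"), ("confirm", "yes"), ("cancel", "no"),
           ("navigate", "go"), ("terminate", "stop")]),
       ("es", PySem.Dict.mk
          [("seleccionar", "elegir"), ("confirmar", "sí"), ("cancelar", "no"),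
           ("navegar", "ir")])]
  match PySem.Dict.get? simplifications language with
  | some table =>
      table.items.foldl (fun simplified p => PySem.Str.replace simplified p.1 p.2) text
  | none => text

-- ===== PORT B =====
-- B's scanner: at each position try the (word, simple) pairs in order; on a match emit the
-- replacement and skip the word, else copy one character (text.startswith(word, i) = isPrefixOf).
def pvScan (ps : List (List Char × List Char)) : List Char → List Char
  | [] => []
  | c :: t =>
    match ps.find? (fun p => p.1.isPrefixOf (c :: t)) with
    | some kv => kv.2 ++ pvScan ps (t.drop (kv.1.length - 1))
    | none => c :: pvScan ps t
  termination_by l => l.length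
  decreasing_by
    all_goals simp [List.length_drop]

-- the two flat pair lists B's if/elif chain selects
def pvEnPairs : List (List Char × List Char) :=
  [("select".toList, "pick".toList), ("confirm".toList, "yes".toList),
   ("cancel".toList, "no".toList), ("navigate".toList, "go".toList),
   ("terminate".toList, "stop".toList)]

def pvEsPairs : List (List Char × List Char) :=
  [("seleccionar".toList, "elegir".toList), ("confirmar".toList, "sí".toList),
   ("cancelar".toList, "no".toList), ("navegar".toList, "ir".toList)]

def simplify_language_py_alt (text : String) (language : String) : String :=
  if language = "en" then String.ofList (pvScan pvEnPairs text.toList)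
  else if language = "es" then String.ofList (pvScan pvEsPairs text.toList)
  else text

-- ===== PRECONDITION & SPEC =====
def Spec_simplify_language_py (text : String) (language : String) (out : String) : Prop := out = simplify_language_py_alt text language
instance (text : String) (language : String) (out : String) : Decidable (Spec_simplify_language_py text language out) := by unfold Spec_simplify_language_py; infer_instance

-- ===== CLAIM (what is proved, stated in full; the proofs are below) =====
def Claim_equal_simplify_language_py : Prop := ∀ (text : String) (language : String), Dom_simplify_language_py text language → Spec_simplify_language_py text language (simplify_language_py text language)

-- ===== LEMMAS AND PROOFS =====

-- A's str.replace (old ≠ ''), reformulated as the structural recursion pvRepc.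
def pvRepc (old new : List Char) : List Char → List Char
  | [] => []
  | c :: t =>
    if old.isPrefixOf (c :: t) then new ++ pvRepc old new (t.drop (old.length - 1))
    else c :: pvRepc old new t
  termination_by l => l.length
  decreasing_by
    all_goals simp [List.length_drop]

theorem pvRepc_nil (old new : List Char) : pvRepc old new [] = [] := by rw [pvRepc]

theorem pvRepc_cons (old new : List Char) (c : Char) (t : List Char) :
    pvRepc old new (c :: t) =
      if old.isPrefixOf (c :: t) then new ++ pvRepc old new (t.drop (old.length - 1))
      else c :: pvRepc old new t := by rw [pvRepc]

theorem pvScan_nil (ps : List (List Char × List Char)) : pvScan ps [] = [] := by rw [pvScan]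

theorem pvScan_cons (ps : List (List Char × List Char)) (c : Char) (t : List Char) :
    pvScan ps (c :: t) =
      match ps.find? (fun p => p.1.isPrefixOf (c :: t)) with
      | some kv => kv.2 ++ pvScan ps (t.drop (kv.1.length - 1))
      | none => c :: pvScan ps t := by rw [pvScan]

theorem pvScan_cons_some (ps : List (List Char × List Char)) (c : Char) (t : List Char)
    (kv : List Char × List Char) (h : ps.find? (fun p => p.1.isPrefixOf (c :: t)) = some kv) :
    pvScan ps (c :: t) = kv.2 ++ pvScan ps (t.drop (kv.1.length - 1)) := by
  rw [pvScan_cons, h]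

theorem pvScan_cons_none (ps : List (List Char × List Char)) (c : Char) (t : List Char)
    (h : ps.find? (fun p => p.1.isPrefixOf (c :: t)) = none) :
    pvScan ps (c :: t) = c :: pvScan ps t := by
  rw [pvScan_cons, h]

-- equations of PySem.Chars.replace.go (definitional)
theorem pvGo_zero (old new l acc : List Char) :
    PySem.Chars.replace.go old new 0 l acc = acc.reverse ++ l := rfl

theorem pvGo_succ_nil (old new : List Char) (fuel : Nat) (acc : List Char) :
    PySem.Chars.replace.go old new (fuel + 1) [] acc = acc.reverse := rfl

theorem pvGo_succ_cons (old new : List Char) (fuel : Nat) (c : Char) (t acc : List Char) :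
    PySem.Chars.replace.go old new (fuel + 1) (c :: t) acc =
      if old.isPrefixOf (c :: t) then
        PySem.Chars.replace.go old new fuel (List.drop old.length (c :: t)) (new.reverse ++ acc)
      else PySem.Chars.replace.go old new fuel t (c :: acc) := rfl

theorem pvGo_spec (old new : List Char) (hold : old ≠ []) :
    ∀ (fuel : Nat) (l acc : List Char), l.length ≤ fuel →
      PySem.Chars.replace.go old new fuel l acc = acc.reverse ++ pvRepc old new l := by
  intro fuel
  induction fuel with
  | zero =>
    intro l acc hl
    have : l = [] := by cases l with
      | nil => rfl
      | cons c t => simp at hl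
    subst this
    simp [pvGo_zero, pvRepc_nil]
  | succ n ih =>
    intro l acc hl
    cases l with
    | nil => simp [pvGo_succ_nil, pvRepc_nil]
    | cons c t =>
      have hop : 0 < old.length := by cases old with
        | nil => exact absurd rfl hold
        | cons a b => simp
      rw [pvGo_succ_cons, pvRepc_cons]
      by_cases hp : old.isPrefixOf (c :: t)
      · rw [if_pos hp, if_pos hp]
        have hdrop : List.drop old.length (c :: t) = t.drop (old.length - 1) := by
          cases old with
          | nil => exact absurd rfl hold
          | cons a o => simp
        rw [hdrop, ih _ _ (by simp [List.length_drop] at hl ⊢; omega)]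
        simp
      · rw [if_neg hp, if_neg hp, ih _ _ (by simp at hl; omega)]
        simp

theorem pvReplace_eq_repc (s old new : List Char) (hold : old ≠ []) :
    PySem.Chars.replace s old new = pvRepc old new s := by
  unfold PySem.Chars.replace
  rw [if_neg (by simpa [List.isEmpty_iff] using hold)]
  simpa using pvGo_spec old new hold s.length s [] le_rfl

-- pvClash a b: a and b provably differ at a position both have — then no text continuation can
-- make a a prefix of b ++ Y.
def pvClash (a b : List Char) : Bool := (a.zip b).any fun p => !(p.1 == p.2)

theorem pvClash_not_prefix : ∀ (a b Y : List Char), pvClash a b = true → ¬ a <+: (b ++ Y) := by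
  intro a
  induction a with
  | nil => intro b Y h; simp [pvClash] at h
  | cons x a' ih =>
    intro b Y h
    cases b with
    | nil => simp [pvClash] at h
    | cons y b' =>
      simp only [pvClash, List.zip_cons_cons, List.any_cons, Bool.or_eq_true, Bool.not_eq_true',
        beq_eq_false_iff_ne, ne_eq] at h
      intro hpre
      rw [List.cons_append, List.cons_prefix_cons] at hpre
      rcases h with h | h
      · exact h hpre.1
      · exact ih b' Y h hpre.2

theorem pvRepc_append (k v : List Char) :
    ∀ (b X : List Char), (∀ j < b.length, pvClash k (b.drop j) = true) →
      pvRepc k v (b ++ X) = b ++ pvRepc k v X := by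
  intro b
  induction b with
  | nil => intro X _; simp
  | cons c b' ih =>
    intro X h
    rw [List.cons_append, pvRepc_cons, if_neg]
    · rw [ih X (fun j hj => h (j + 1) (by simp; omega)), List.cons_append]
    · simp only [List.isPrefixOf_iff_prefix]
      have := h 0 (by simp)
      simp only [List.drop_zero] at this
      exact fun hp => pvClash_not_prefix k (c :: b') X this (by simpa using hp)

theorem pvScan_empty : ∀ l : List Char, pvScan [] l = l := by
  intro l
  induction l with
  | nil => exact pvScan_nil []
  | cons c t ih => rw [pvScan_cons_none [] c t (by simp), ih]

theorem pvScan_skip (ps : List (List Char × List Char)) :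
    ∀ (b r : List Char),
      (b ≠ [] → ∀ p ∈ ps, ¬ p.1 <+: (b ++ r)) →
      (∀ j < b.length, j ≠ 0 → ∀ p ∈ ps, pvClash p.1 (b.drop j) = true) →
      pvScan ps (b ++ r) = b ++ pvScan ps r := by
  intro b
  induction b with
  | nil => intro r _ _; simp
  | cons c b' ih =>
    intro r h0 hC2
    have hfind : ps.find? (fun p => p.1.isPrefixOf (c :: (b' ++ r))) = none := by
      rw [List.find?_eq_none]
      intro p hp
      simp only [List.isPrefixOf_iff_prefix]
      exact fun hcon => h0 (by simp) p hp (by rw [List.cons_append]; exact hcon)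
    rw [List.cons_append, pvScan_cons_none ps c (b' ++ r) hfind]
    rw [ih r ?h0' ?hC2', List.cons_append]
    case h0' =>
      intro hb' p hp
      have h1 : pvClash p.1 ((c :: b').drop 1) = true := by
        apply hC2 1 ?_ (by omega) p hp
        cases b' with
        | nil => exact absurd rfl hb'
        | cons _ _ => simp
      simpa using pvClash_not_prefix p.1 b' r (by simpa using h1)
    case hC2' =>
      intro j hj hj0 p hp
      simpa using hC2 (j + 1) (by simp; omega) (by omega) p hp

theorem pvScan_no_create (ps : List (List Char × List Char)) (k : List Char)
    (hC4 : ∀ j < k.length, ∀ p ∈ ps, pvClash (k.drop j) p.2 = true) :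
    ∀ (m : List Char) (j : Nat), (k.drop j) <+: (pvScan ps m) → (k.drop j) <+: m := by
  intro m
  induction m with
  | nil =>
    intro j h
    rw [pvScan_nil] at h
    simpa using h
  | cons c t ih =>
    intro j h
    by_cases hj : j < k.length
    · cases hfind : ps.find? (fun p => p.1.isPrefixOf (c :: t)) with
      | some kv =>
        rw [pvScan_cons_some ps c t kv hfind] at h
        exact absurd h (pvClash_not_prefix _ _ _ (hC4 j hj kv (List.mem_of_find?_eq_some hfind)))
      | none =>
        rw [pvScan_cons_none ps c t hfind] at h
        cases hd : k.drop j with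
        | nil => exact List.nil_prefix
        | cons a s' =>
          rw [hd] at h
          rw [List.cons_prefix_cons] at h
          have hdrop1 : k.drop (j + 1) = s' := by
            have : k.drop (j + 1) = (k.drop j).drop 1 := by rw [List.drop_drop]
            rw [this, hd, List.drop_one, List.tail_cons]
          have := ih (j + 1) (by rw [hdrop1]; exact h.2)
          rw [hdrop1] at this
          exact List.cons_prefix_cons.mpr ⟨h.1, this⟩
    · have hnil : k.drop j = [] := List.drop_eq_nil_of_le (by omega)
      rw [hnil]; exact List.nil_prefix

-- Master lemma: appending one (word, replacement) pair to the scanner's table is the same as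
-- running A's str.replace for that pair after the scan, under the concrete non-interference facts.
theorem pvScan_snoc (ps : List (List Char × List Char)) (k v : List Char) (hk : k ≠ [])
    (hC1 : ∀ p ∈ ps, ∀ j < p.2.length, pvClash k (p.2.drop j) = true)
    (hC2 : ∀ j < k.length, j ≠ 0 → ∀ p ∈ ps, pvClash p.1 (k.drop j) = true)
    (hC4 : ∀ j < k.length, ∀ p ∈ ps, pvClash (k.drop j) p.2 = true) :
    ∀ (n : Nat) (l : List Char), l.length ≤ n →
      pvRepc k v (pvScan ps l) = pvScan (ps ++ [(k, v)]) l := by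
  intro n
  induction n with
  | zero =>
    intro l hl
    have : l = [] := by cases l with
      | nil => rfl
      | cons c t => simp at hl
    subst this
    rw [pvScan_nil, pvScan_nil, pvRepc_nil]
  | succ n ih =>
    intro l hl
    cases l with
    | nil => rw [pvScan_nil, pvScan_nil, pvRepc_nil]
    | cons c t =>
      cases hfind : ps.find? (fun p => p.1.isPrefixOf (c :: t)) with
      | some kv =>
        have hmem := List.mem_of_find?_eq_some hfind
        rw [pvScan_cons_some ps c t kv hfind]
        rw [pvScan_cons_some (ps ++ [(k, v)]) c t kv (by rw [List.find?_append, hfind]; rfl)]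
        rw [pvRepc_append k v kv.2 _ (hC1 kv hmem)]
        congr 1
        exact ih _ (by simp [List.length_drop] at hl ⊢; omega)
      | none =>
        by_cases hkp : k <+: (c :: t)
        · obtain ⟨r, hr⟩ := hkp
          cases k with
          | nil => exact absurd rfl hk
          | cons a k'' =>
            rw [List.cons_append] at hr
            injection hr with hac htr
            subst hac
            subst htr
            have hscan : pvScan ps (a :: (k'' ++ r)) = (a :: k'') ++ pvScan ps r := by
              rw [show a :: (k'' ++ r) = (a :: k'') ++ r from by rw [List.cons_append]]
              apply pvScan_skip ps (a :: k'') r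
              · intro _ p hp
                have := List.find?_eq_none.mp hfind p hp
                simp only [List.isPrefixOf_iff_prefix] at this
                simpa [List.cons_append] using this
              · exact hC2
            rw [hscan]
            have hhead : pvRepc (a :: k'') v ((a :: k'') ++ pvScan ps r) =
                v ++ pvRepc (a :: k'') v (pvScan ps r) := by
              rw [List.cons_append, pvRepc_cons, if_pos (by
                simp only [List.isPrefixOf_iff_prefix]
                exact ⟨pvScan ps r, by rw [List.cons_append]⟩)]
              congr 2
              simp
            rw [hhead]
            have hpref : (a :: k'').isPrefixOf (a :: (k'' ++ r)) = true := by
              simp only [List.isPrefixOf_iff_prefix]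
              exact ⟨r, by rw [List.cons_append]⟩
            have hfind' : (ps ++ [(a :: k'', v)]).find?
                (fun p => p.1.isPrefixOf (a :: (k'' ++ r))) = some (a :: k'', v) := by
              rw [List.find?_append, hfind]
              simp [hpref]
            rw [pvScan_cons_some (ps ++ [(a :: k'', v)]) a (k'' ++ r) (a :: k'', v) hfind']
            have hdrop : List.drop ((a :: k'').length - 1) (k'' ++ r) = r := by
              simp
            rw [hdrop]
            congr 1
            exact ih r (by simp at hl; omega)
        · rw [pvScan_cons_none ps c t hfind]
          have hfind2 : (ps ++ [(k, v)]).find? (fun p => p.1.isPrefixOf (c :: t)) = none := by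
            rw [List.find?_append, hfind]
            simp [List.isPrefixOf_iff_prefix]
            exact hkp
          rw [pvScan_cons_none (ps ++ [(k, v)]) c t hfind2]
          have hnp : ¬ k.isPrefixOf (c :: pvScan ps t) = true := by
            simp only [List.isPrefixOf_iff_prefix]
            intro hpre
            have h2 : k <+: pvScan ps (c :: t) := by
              rw [pvScan_cons_none ps c t hfind]; exact hpre
            have := pvScan_no_create ps k hC4 (c :: t) 0 (by simpa using h2)
            exact hkp (by simpa using this)
          rw [pvRepc_cons, if_neg hnp]
          rw [ih t (by simp at hl; omega)]

-- the two concrete tables on the List Char side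
theorem pvChain_en : ∀ l : List Char,
    pvRepc "terminate".toList "stop".toList (pvRepc "navigate".toList "go".toList
      (pvRepc "cancel".toList "no".toList (pvRepc "confirm".toList "yes".toList
        (pvRepc "select".toList "pick".toList l)))) =
    pvScan pvEnPairs l := by
  have s1 : ∀ m : List Char, pvRepc "select".toList "pick".toList m =
      pvScan [("select".toList, "pick".toList)] m := by
    intro m
    have := pvScan_snoc [] "select".toList "pick".toList (by decide)
      (by simp) (by simp) (by simp) m.length m le_rfl
    rw [pvScan_empty m] at this
    simpa using this
  have s2 : ∀ m : List Char, pvRepc "confirm".toList "yes".toList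
      (pvScan [("select".toList, "pick".toList)] m) =
      pvScan [("select".toList, "pick".toList), ("confirm".toList, "yes".toList)] m := by
    intro m
    have := pvScan_snoc [("select".toList, "pick".toList)] "confirm".toList "yes".toList
      (by decide) (by decide) (by decide) (by decide) m.length m le_rfl
    simpa using this
  have s3 : ∀ m : List Char, pvRepc "cancel".toList "no".toList
      (pvScan [("select".toList, "pick".toList), ("confirm".toList, "yes".toList)] m) =
      pvScan [("select".toList, "pick".toList), ("confirm".toList, "yes".toList),
              ("cancel".toList, "no".toList)] m := by
    intro m
    have := pvScan_snoc [("select".toList, "pick".toList), ("confirm".toList, "yes".toList)]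
      "cancel".toList "no".toList (by decide) (by decide) (by decide) (by decide) m.length m le_rfl
    simpa using this
  have s4 : ∀ m : List Char, pvRepc "navigate".toList "go".toList
      (pvScan [("select".toList, "pick".toList), ("confirm".toList, "yes".toList),
               ("cancel".toList, "no".toList)] m) =
      pvScan [("select".toList, "pick".toList), ("confirm".toList, "yes".toList),
              ("cancel".toList, "no".toList), ("navigate".toList, "go".toList)] m := by
    intro m
    have := pvScan_snoc [("select".toList, "pick".toList), ("confirm".toList, "yes".toList),
      ("cancel".toList, "no".toList)] "navigate".toList "go".toList
      (by decide) (by decide) (by decide) (by decide) m.length m le_rfl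
    simpa using this
  have s5 : ∀ m : List Char, pvRepc "terminate".toList "stop".toList
      (pvScan [("select".toList, "pick".toList), ("confirm".toList, "yes".toList),
               ("cancel".toList, "no".toList), ("navigate".toList, "go".toList)] m) =
      pvScan [("select".toList, "pick".toList), ("confirm".toList, "yes".toList),
              ("cancel".toList, "no".toList), ("navigate".toList, "go".toList),
              ("terminate".toList, "stop".toList)] m := by
    intro m
    have := pvScan_snoc [("select".toList, "pick".toList), ("confirm".toList, "yes".toList),
      ("cancel".toList, "no".toList), ("navigate".toList, "go".toList)]
      "terminate".toList "stop".toList (by decide) (by decide) (by decide) (by decide)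
      m.length m le_rfl
    simpa using this
  intro l
  rw [s1, s2, s3, s4, s5]
  rfl

theorem pvChain_es : ∀ l : List Char,
    pvRepc "navegar".toList "ir".toList (pvRepc "cancelar".toList "no".toList
      (pvRepc "confirmar".toList "sí".toList
        (pvRepc "seleccionar".toList "elegir".toList l))) =
    pvScan pvEsPairs l := by
  have s1 : ∀ m : List Char, pvRepc "seleccionar".toList "elegir".toList m =
      pvScan [("seleccionar".toList, "elegir".toList)] m := by
    intro m
    have := pvScan_snoc [] "seleccionar".toList "elegir".toList (by decide)
      (by simp) (by simp) (by simp) m.length m le_rfl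
    rw [pvScan_empty m] at this
    simpa using this
  have s2 : ∀ m : List Char, pvRepc "confirmar".toList "sí".toList
      (pvScan [("seleccionar".toList, "elegir".toList)] m) =
      pvScan [("seleccionar".toList, "elegir".toList), ("confirmar".toList, "sí".toList)] m := by
    intro m
    have := pvScan_snoc [("seleccionar".toList, "elegir".toList)] "confirmar".toList "sí".toList
      (by decide) (by decide) (by decide) (by decide) m.length m le_rfl
    simpa using this
  have s3 : ∀ m : List Char, pvRepc "cancelar".toList "no".toList
      (pvScan [("seleccionar".toList, "elegir".toList), ("confirmar".toList, "sí".toList)] m) =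
      pvScan [("seleccionar".toList, "elegir".toList), ("confirmar".toList, "sí".toList),
              ("cancelar".toList, "no".toList)] m := by
    intro m
    have := pvScan_snoc [("seleccionar".toList, "elegir".toList), ("confirmar".toList, "sí".toList)]
      "cancelar".toList "no".toList (by decide) (by decide) (by decide) (by decide) m.length m le_rfl
    simpa using this
  have s4 : ∀ m : List Char, pvRepc "navegar".toList "ir".toList
      (pvScan [("seleccionar".toList, "elegir".toList), ("confirmar".toList, "sí".toList),
               ("cancelar".toList, "no".toList)] m) =
      pvScan [("seleccionar".toList, "elegir".toList), ("confirmar".toList, "sí".toList),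
              ("cancelar".toList, "no".toList), ("navegar".toList, "ir".toList)] m := by
    intro m
    have := pvScan_snoc [("seleccionar".toList, "elegir".toList), ("confirmar".toList, "sí".toList),
      ("cancelar".toList, "no".toList)] "navegar".toList "ir".toList
      (by decide) (by decide) (by decide) (by decide) m.length m le_rfl
    simpa using this
  intro l
  rw [s1, s2, s3, s4]
  rfl

-- ===== VERDICT (by name: the statement is the Claim_ definition above) =====
theorem simplify_language_py_spec : Claim_equal_simplify_language_py := by
  unfold Claim_equal_simplify_language_py Spec_simplify_language_py
  intro text language _
  unfold simplify_language_py simplify_language_py_alt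
  by_cases hen : language = "en"
  · subst hen
    rw [if_pos rfl]
    show List.foldl _ text _ = String.ofList (pvScan pvEnPairs text.toList)
    simp only [List.foldl]
    simp only [PySem.Str.replace, String.toList_ofList]
    refine congrArg String.ofList ?_
    rw [pvReplace_eq_repc _ "select".toList "pick".toList (by decide),
      pvReplace_eq_repc _ "confirm".toList "yes".toList (by decide),
      pvReplace_eq_repc _ "cancel".toList "no".toList (by decide),
      pvReplace_eq_repc _ "navigate".toList "go".toList (by decide),
      pvReplace_eq_repc _ "terminate".toList "stop".toList (by decide)]
    exact pvChain_en text.toList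
  · by_cases hes : language = "es"
    · subst hes
      rw [if_neg (by decide), if_pos rfl]
      show List.foldl _ text _ = String.ofList (pvScan pvEsPairs text.toList)
      simp only [List.foldl]
      simp only [PySem.Str.replace, String.toList_ofList]
      refine congrArg String.ofList ?_
      rw [pvReplace_eq_repc _ "seleccionar".toList "elegir".toList (by decide),
        pvReplace_eq_repc _ "confirmar".toList "sí".toList (by decide),
        pvReplace_eq_repc _ "cancelar".toList "no".toList (by decide),
        pvReplace_eq_repc _ "navegar".toList "ir".toList (by decide)]
      exact pvChain_es text.toList
    · rw [if_neg hen, if_neg hes]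
      have e1 : ("en" == language) = false := beq_eq_false_iff_ne.mpr (fun h => hen h.symm)
      have e2 : ("es" == language) = false := beq_eq_false_iff_ne.mpr (fun h => hes h.symm)
      simp only [PySem.Dict.get?, List.find?, e1, e2]
      rfl
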